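-- pv_equiv track=rewrite | github.com/groowe/sudoku-mine | sudoku7.py | preprint
-- ===== SOURCE A (Python) =====
-- def preprint(line):
-- #    s = []
-- #    for item in line:
-- #        if type(item) == int:
-- #            s.append(item)
-- #        else:
-- #            s.append(" ")
-- #    s = [" " if type(x) == int else x for x in line]
-- #    s = [if type(x) == int x for x else " " for x in line]
--     s = [i if type(i) == int else " " for i in line]
--     s = str(s)
--     s = s.replace("None"," ").replace("[","|")
--     s = s.replace("]","|").replace("\'","")
--
--     line = s
--     newline = ""
--     countchar = 0
--     checkchar = ","
--     for char in line:
--         if char == checkchar: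
--             countchar +=1
--             if countchar % 3 == 0:
--                 newline +='|'
--             else:
--                 newline +=' '
--         else:
--             newline+=char
--     return newline
-- ===== SOURCE B (Python) =====
-- def preprint(line):
--     # Build display cells directly and assemble with one indexed pass;
--     # no str(list) serialization or character-scan comma counting.
--     cells = [str(i) if type(i) == int else " " for i in line]
--     out = "|"
--     for j, c in enumerate(cells):
--         if j > 0:
--             out += "| " if j % 3 == 0 else "  "
--         out += c
--     return out + "|"
-- ===== Notes on version B (the rewrite author's own statement) =====
-- stated objective: simpler
-- what changed: B builds the display cell for each item directly and assembles the row in one indexed pass (separator '| ' at every third cell, ' ' otherwise), replacing A's str(list) serialization, four .replace passes and character-by-character comma-counting scan.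
import Mathlib
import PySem

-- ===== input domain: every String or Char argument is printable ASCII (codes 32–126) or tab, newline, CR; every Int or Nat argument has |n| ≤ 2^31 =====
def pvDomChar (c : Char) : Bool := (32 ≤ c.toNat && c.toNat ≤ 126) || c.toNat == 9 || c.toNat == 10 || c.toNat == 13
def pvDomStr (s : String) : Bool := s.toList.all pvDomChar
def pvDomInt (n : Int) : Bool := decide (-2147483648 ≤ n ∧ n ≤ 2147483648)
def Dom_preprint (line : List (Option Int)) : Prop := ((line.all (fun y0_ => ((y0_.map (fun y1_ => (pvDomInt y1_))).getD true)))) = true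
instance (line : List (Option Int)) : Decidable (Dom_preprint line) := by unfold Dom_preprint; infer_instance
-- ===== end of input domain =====

-- B builds the display cells directly and assembles the row in one indexed pass,
-- instead of A's str(list) serialization, four .replace passes and comma-counting scan (objective: simpler).

-- ===== PORT A =====
-- Python repr(x) for the values appearing in s: an int, or the string " " (hand-port, exact on these values)
def pvReprA (o : Option Int) : List Char :=
  match o with
  | some n => PySem.Int.toChars n
  | none => ['\'', ' ', '\'']

-- the ", " joining inside Python's str(list) (hand-port of the list serialization, exact here)
def pvJoinSep (cells : List (List Char)) : List Char :=
  match cells with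
  | [] => []
  | c :: cs => c ++ cs.flatMap (fun d => ',' :: ' ' :: d)

-- str(s): '[' + ', '-joined reprs + ']' (hand-port of Python str(list); exact for ints and " ")
def pvStrList (line : List (Option Int)) : List Char :=
  '[' :: pvJoinSep (line.map pvReprA) ++ [']']

-- the body of A's `for char in line:` loop, state = (newline, countchar)
def pvLoopStep (st : List Char × Int) (ch : Char) : List Char × Int :=
  if ch = ',' then
    let cnt := st.2 + 1
    (st.1 ++ (if PySem.Int.mod cnt 3 == 0 then ['|'] else [' ']), cnt)
  else (st.1 ++ [ch], st.2)

def preprint (line : List (Option Int)) : String :=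
  let s0 := pvStrList line
  let s1 := PySem.Chars.replace (PySem.Chars.replace s0 ['N', 'o', 'n', 'e'] [' ']) ['['] ['|']
  let s2 := PySem.Chars.replace (PySem.Chars.replace s1 [']'] ['|']) ['\''] []
  String.ofList (s2.foldl pvLoopStep ([], 0)).1

-- ===== PORT B =====
-- str(i) if type(i) == int else " "
def pvCell (o : Option Int) : List Char :=
  match o with
  | some n => PySem.Int.toChars n
  | none => [' ']

-- the body of B's `for j, c in enumerate(cells):` loop
def pvBStep (acc : List Char) (jc : Int × List Char) : List Char :=
  (if jc.1 > 0 then acc ++ (if PySem.Int.mod jc.1 3 == 0 then ['|', ' '] else [' ', ' ']) else acc) ++ jc.2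

def preprint_alt (line : List (Option Int)) : String :=
  let cells := line.map pvCell
  String.ofList (((PySem.List.enumerate cells).foldl pvBStep ['|']) ++ ['|'])

-- ===== PRECONDITION & SPEC =====
def Spec_preprint (line : List (Option Int)) (out : String) : Prop := out = preprint_alt line
instance (line : List (Option Int)) (out : String) : Decidable (Spec_preprint line out) := by unfold Spec_preprint; infer_instance

-- ===== CLAIM (what is proved, stated in full; the proofs are below) =====
def Claim_equal_preprint : Prop := ∀ (line : List (Option Int)), Dom_preprint line → Spec_preprint line (preprint line)

-- ===== LEMMAS AND PROOFS =====

-- characters produced by Nat.toDigitsCore are digit characters (or come from the accumulator)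
lemma pv_mem_toDigitsCore (f : Nat) : ∀ (n : Nat) (acc : List Char) (c : Char),
    c ∈ Nat.toDigitsCore 10 f n acc → c ∈ acc ∨ ∃ d, d < 10 ∧ c = Nat.digitChar d := by
  induction f with
  | zero => intro n acc c hc; simp only [Nat.toDigitsCore] at hc; exact Or.inl hc
  | succ f ih =>
    intro n acc c hc
    simp only [Nat.toDigitsCore] at hc
    by_cases h : n / 10 = 0
    · simp only [h, if_true] at hc
      rcases List.mem_cons.mp hc with h1 | h1
      · exact Or.inr ⟨n % 10, Nat.mod_lt _ (by omega), h1⟩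
      · exact Or.inl h1
    · simp only [h, if_false] at hc
      rcases ih (n / 10) _ c hc with h1 | h1
      · rcases List.mem_cons.mp h1 with h2 | h2
        · exact Or.inr ⟨n % 10, Nat.mod_lt _ (by omega), h2⟩
        · exact Or.inl h2
      · exact Or.inr h1

lemma pv_mem_toChars (n : Int) (c : Char) (hc : c ∈ PySem.Int.toChars n) :
    c = '-' ∨ ∃ d, d < 10 ∧ c = Nat.digitChar d := by
  unfold PySem.Int.toChars Nat.toDigits at hc
  split at hc
  · rcases List.mem_cons.mp hc with h | h
    · exact Or.inl h
    · rcases pv_mem_toDigitsCore _ _ _ _ h with h1 | h1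
      · simp at h1
      · exact Or.inr h1
  · rcases pv_mem_toDigitsCore _ _ _ _ hc with h1 | h1
    · simp at h1
    · exact Or.inr h1

lemma pv_toChars_ne (n : Int) (c : Char) (hc : c ∈ PySem.Int.toChars n) :
    c ≠ 'N' ∧ c ≠ ',' ∧ c ≠ '[' ∧ c ≠ ']' ∧ c ≠ '\'' := by
  rcases pv_mem_toChars n c hc with h | ⟨d, hd, h⟩
  · subst h; decide
  · subst h
    revert hd
    exact (by decide : ∀ d, d < 10 → Nat.digitChar d ≠ 'N' ∧ Nat.digitChar d ≠ ',' ∧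
      Nat.digitChar d ≠ '[' ∧ Nat.digitChar d ≠ ']' ∧ Nat.digitChar d ≠ '\'') d

-- replace is the identity when the pattern's first character does not occur
lemma pv_replace_go_not_head (a : Char) (pt new : List Char) :
    ∀ (fuel : Nat) (s acc : List Char), a ∉ s →
      PySem.Chars.replace.go (a :: pt) new fuel s acc = acc.reverse ++ s := by
  intro fuel
  induction fuel with
  | zero => intro s acc _; simp [PySem.Chars.replace.go]
  | succ fuel ih =>
    intro s acc ha
    cases s with
    | nil => simp [PySem.Chars.replace.go]
    | cons c t =>
      have hac : a ≠ c := fun h => ha (h ▸ List.mem_cons_self)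
      have hca : ((a :: pt).isPrefixOf (c :: t)) = false := by
        simp [List.isPrefixOf_cons₂, hac]
      simp only [PySem.Chars.replace.go, hca]
      rw [ih t (c :: acc) (fun h => ha (List.mem_cons_of_mem _ h))]
      simp

lemma pv_replace_not_head (a : Char) (pt new s : List Char) (ha : a ∉ s) :
    PySem.Chars.replace s (a :: pt) new = s := by
  simp only [PySem.Chars.replace, List.isEmpty_cons, Bool.false_eq_true, if_false]
  simpa using pv_replace_go_not_head a pt new s.length s [] ha

-- single-character replace is a flatMap
lemma pv_replace_go_single (a : Char) (new : List Char) :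
    ∀ (fuel : Nat) (s acc : List Char), s.length ≤ fuel →
      PySem.Chars.replace.go [a] new fuel s acc =
        acc.reverse ++ s.flatMap (fun c => if c = a then new else [c]) := by
  intro fuel
  induction fuel with
  | zero =>
    intro s acc h
    have : s = [] := List.eq_nil_of_length_eq_zero (Nat.le_zero.mp h)
    subst this; simp [PySem.Chars.replace.go]
  | succ fuel ih =>
    intro s acc h
    cases s with
    | nil => simp [PySem.Chars.replace.go]
    | cons c t =>
      by_cases hc : c = a
      · subst hc
        have hp : ([c].isPrefixOf (c :: t)) = true := by simp [List.isPrefixOf]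
        simp only [PySem.Chars.replace.go, hp, if_true, List.length_cons, List.length_nil,
          List.drop_succ_cons, List.drop_zero]
        rw [ih t (new.reverse ++ acc) (by simpa using Nat.le_of_succ_le_succ h)]
        simp [List.flatMap_cons]
      · have hp : ([a].isPrefixOf (c :: t)) = false := by
          simp only [List.isPrefixOf_cons₂, List.isPrefixOf_nil_left, Bool.and_true]
          simp only [beq_eq_false_iff_ne, ne_eq]
          exact fun h => hc h.symm
        simp only [PySem.Chars.replace.go, hp]
        rw [ih t (c :: acc) (by simpa using Nat.le_of_succ_le_succ h)]
        simp [List.flatMap_cons, hc]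

lemma pv_replace_single (a : Char) (new s : List Char) :
    PySem.Chars.replace s [a] new = s.flatMap (fun c => if c = a then new else [c]) := by
  simp only [PySem.Chars.replace, List.isEmpty_cons, Bool.false_eq_true, if_false]
  simpa using pv_replace_go_single a new s.length s [] (le_refl _)

lemma pv_flatMap_eq_self (f : Char → List Char) (s : List Char) (h : ∀ c ∈ s, f c = [c]) :
    s.flatMap f = s := by
  induction s with
  | nil => simp
  | cons c t ih =>
    rw [List.flatMap_cons, h c List.mem_cons_self,
      ih (fun x hx => h x (List.mem_cons_of_mem _ hx))]
    rfl

-- any character of the joined body is a separator, a quote, a space, or a character of some str(n)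
lemma pv_mem_joinSep (line : List (Option Int)) (c : Char)
    (hc : c ∈ pvJoinSep (line.map pvReprA)) :
    c = ',' ∨ c = ' ' ∨ c = '\'' ∨ ∃ n, c ∈ PySem.Int.toChars n := by
  cases line with
  | nil => simp [pvJoinSep] at hc
  | cons o rest =>
    have hcell : ∀ (o' : Option Int), c ∈ pvReprA o' →
        c = ',' ∨ c = ' ' ∨ c = '\'' ∨ ∃ n, c ∈ PySem.Int.toChars n := by
      intro o' hm
      cases o' with
      | some n => exact Or.inr (Or.inr (Or.inr ⟨n, hm⟩))
      | none =>
        simp only [pvReprA, List.mem_cons, List.not_mem_nil, or_false] at hm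
        rcases hm with h | h | h
        · exact Or.inr (Or.inr (Or.inl h))
        · exact Or.inr (Or.inl h)
        · exact Or.inr (Or.inr (Or.inl h))
    simp only [List.map_cons, pvJoinSep, List.mem_append, List.mem_flatMap] at hc
    rcases hc with h | ⟨d, hd, hcd⟩
    · exact hcell o h
    · rcases List.mem_map.mp hd with ⟨o', _, rfl⟩
      rcases List.mem_cons.mp hcd with h | h
      · exact Or.inl h
      rcases List.mem_cons.mp h with h | h
      · exact Or.inr (Or.inl h)
      · exact hcell o' h

lemma pv_body_ne (line : List (Option Int)) (c : Char)
    (hc : c ∈ pvJoinSep (line.map pvReprA)) : c ≠ 'N' ∧ c ≠ '[' ∧ c ≠ ']' := by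
  rcases pv_mem_joinSep line c hc with h | h | h | ⟨n, h⟩
  · subst h; decide
  · subst h; decide
  · subst h; decide
  · have := pv_toChars_ne n c h
    exact ⟨this.1, this.2.2.1, this.2.2.2.1⟩

-- the quote-stripping flatMap turns each repr cell into the display cell
lemma pv_f3_cell (o : Option Int) :
    (pvReprA o).flatMap (fun c => if c = '\'' then ([] : List Char) else [c]) = pvCell o := by
  cases o with
  | some n =>
    simp only [pvReprA, pvCell]
    apply pv_flatMap_eq_self
    intro c hc
    simp [(pv_toChars_ne n c hc).2.2.2.2]
  | none => rfl

lemma pv_f3_joinSep (line : List (Option Int)) :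
    (pvJoinSep (line.map pvReprA)).flatMap (fun c => if c = '\'' then [] else [c]) =
      pvJoinSep (line.map pvCell) := by
  cases line with
  | nil => simp [pvJoinSep]
  | cons o rest =>
    simp only [List.map_cons, pvJoinSep, List.flatMap_append, pv_f3_cell]
    congr 1
    rw [List.flatMap_assoc]
    rw [List.flatMap_map, List.flatMap_map]
    apply List.flatMap_congr
    intro o' _
    simp [pv_f3_cell]

lemma pv_mod3 (m : Nat) : PySem.Int.mod (m : Int) 3 = ((m % 3 : Nat) : Int) := by
  exact_mod_cast PySem.Int.mod_natCast m 3

-- the common assembled tail: cells at indices j, j+1, … (j ≥ 1)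
def pvTail (j : Nat) : List (List Char) → List Char
  | [] => []
  | c :: cs => (if j % 3 == 0 then '|' else ' ') :: ' ' :: (c ++ pvTail (j + 1) cs)

-- A's comma loop over comma-free text appends it unchanged
lemma pv_foldl_no_comma : ∀ (s acc : List Char) (k : Int), ',' ∉ s →
    s.foldl pvLoopStep (acc, k) = (acc ++ s, k) := by
  intro s
  induction s with
  | nil => intro acc k _; simp
  | cons c t ih =>
    intro acc k hc
    have h1 : ¬ (c = ',') := fun h => hc (h ▸ List.mem_cons_self)
    simp only [List.foldl_cons, pvLoopStep, h1, if_false]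
    rw [ih (acc ++ [c]) k (fun h => hc (List.mem_cons_of_mem _ h))]
    simp

-- A's comma loop over the separated cells produces the assembled tail
lemma pv_foldl_tail : ∀ (cells : List (List Char)) (k : Nat) (acc : List Char),
    (∀ cs ∈ cells, ',' ∉ cs) →
    (cells.flatMap (fun d => ',' :: ' ' :: d)).foldl pvLoopStep (acc, (k : Int)) =
      (acc ++ pvTail (k + 1) cells, ((k + cells.length : Nat) : Int)) := by
  intro cells
  induction cells with
  | nil => intro k acc _; simp [pvTail]
  | cons c cs ih =>
    intro k acc hnc
    have hc0 : ',' ∉ c := hnc c List.mem_cons_self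
    have hcs : ∀ x ∈ cs, ',' ∉ x := fun x hx => hnc x (List.mem_cons_of_mem _ hx)
    have hstep : pvLoopStep (acc, (k : Int)) ',' =
        (acc ++ [if (k + 1) % 3 == 0 then '|' else ' '], ((k + 1 : Nat) : Int)) := by
      have h1 : (k : Int) + 1 = ((k + 1 : Nat) : Int) := by push_cast; ring
      simp only [pvLoopStep, h1, pv_mod3]
      by_cases h3 : (k + 1) % 3 = 0
      · have hb : ((((k + 1) % 3 : Nat) : Int) == 0) = true := by
          rw [beq_iff_eq]; exact_mod_cast h3
        rw [hb]; simp [h3]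
      · have hb : ((((k + 1) % 3 : Nat) : Int) == 0) = false := by
          rw [beq_eq_false_iff_ne]; exact_mod_cast h3
        rw [hb]; simp [h3]
    have hsplit : (c :: cs).flatMap (fun d => ',' :: ' ' :: d) =
        ',' :: ((' ' :: c) ++ cs.flatMap (fun d => ',' :: ' ' :: d)) := by simp
    rw [hsplit, List.foldl_cons, hstep, List.foldl_append,
      pv_foldl_no_comma (' ' :: c) _ _ (by simp [hc0]),
      ih (k + 1) _ hcs]
    rw [Prod.mk.injEq]
    refine ⟨by simp [pvTail, List.append_assoc], ?_⟩
    simp only [List.length_cons]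
    congr 1
    omega

-- B's loop over enumerate produces the same assembled tail
lemma pv_foldl_alt : ∀ (cells : List (List Char)) (j : Nat) (acc : List Char), 1 ≤ j →
    (PySem.List.enumerate cells (j : Int)).foldl pvBStep acc = acc ++ pvTail j cells := by
  intro cells
  induction cells with
  | nil => intro j acc _; simp [PySem.List.enumerate, pvTail]
  | cons c cs ih =>
    intro j acc hj
    simp only [PySem.List.enumerate, List.foldl_cons]
    have hpos : ((j : Int) > 0) := by exact_mod_cast hj
    have hcast : (j : Int) + 1 = ((j + 1 : Nat) : Int) := by push_cast; ring
    rw [hcast, ih (j + 1) _ (by omega)]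
    simp only [pvBStep, if_pos hpos, pv_mod3, pvTail]
    by_cases h3 : j % 3 = 0
    · have hb : (((j % 3 : Nat) : Int) == 0) = true := by
        rw [beq_iff_eq]; exact_mod_cast h3
      rw [hb]; simp [h3, List.append_assoc]
    · have hb : (((j % 3 : Nat) : Int) == 0) = false := by
        rw [beq_eq_false_iff_ne]; exact_mod_cast h3
      rw [hb]; simp [h3, List.append_assoc]

-- the serialized-and-replaced string of A, in display form
lemma pv_s2 (line : List (Option Int)) :
    PySem.Chars.replace (PySem.Chars.replace (PySem.Chars.replace
        (PySem.Chars.replace (pvStrList line) ['N', 'o', 'n', 'e'] [' '])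
        ['['] ['|']) [']'] ['|']) ['\''] [] =
      '|' :: pvJoinSep (line.map pvCell) ++ ['|'] := by
  have hN : 'N' ∉ pvStrList line := by
    intro h
    simp only [pvStrList, List.mem_cons, List.mem_append] at h
    rcases h with (h | h) | h
    · exact absurd h (by decide)
    · exact (pv_body_ne line _ h).1 rfl
    · exact absurd h (by decide)
  rw [pv_replace_not_head _ _ _ _ hN, pv_replace_single, pv_replace_single, pv_replace_single]
  have hb1 : (pvJoinSep (line.map pvReprA)).flatMap
      (fun c => if c = '[' then ['|'] else [c]) = pvJoinSep (line.map pvReprA) :=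
    pv_flatMap_eq_self _ _ (fun c hc => by simp [(pv_body_ne line c hc).2.1])
  have hb2 : (pvJoinSep (line.map pvReprA)).flatMap
      (fun c => if c = ']' then ['|'] else [c]) = pvJoinSep (line.map pvReprA) :=
    pv_flatMap_eq_self _ _ (fun c hc => by simp [(pv_body_ne line c hc).2.2])
  have e1 : (pvStrList line).flatMap (fun c => if c = '[' then ['|'] else [c]) =
      '|' :: (pvJoinSep (line.map pvReprA) ++ [']']) := by
    simp only [pvStrList, List.flatMap_cons, List.flatMap_append, List.flatMap_nil, hb1]
    simp
  rw [e1]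
  have e2 : ('|' :: (pvJoinSep (line.map pvReprA) ++ [']'])).flatMap
      (fun c => if c = ']' then ['|'] else [c]) =
      '|' :: (pvJoinSep (line.map pvReprA) ++ ['|']) := by
    simp only [List.flatMap_cons, List.flatMap_append, List.flatMap_nil, hb2]
    simp
  rw [e2]
  have e3 : ('|' :: (pvJoinSep (line.map pvReprA) ++ ['|'])).flatMap
      (fun c => if c = '\'' then [] else [c]) =
      '|' :: (pvJoinSep (line.map pvCell) ++ ['|']) := by
    simp only [List.flatMap_cons, List.flatMap_append, List.flatMap_nil, pv_f3_joinSep]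
    simp
  rw [e3]
  simp

-- the two assembled results agree
lemma pv_main (line : List (Option Int)) : preprint line = preprint_alt line := by
  unfold preprint preprint_alt
  dsimp only
  rw [pv_s2]
  cases line with
  | nil => rfl
  | cons o rest =>
    simp only [List.map_cons, pvJoinSep]
    have hnc : ',' ∉ pvCell o := by
      cases o with
      | some n => exact fun h => (pv_toChars_ne n ',' h).2.1 rfl
      | none => decide
    have hrest : ∀ x ∈ rest.map pvCell, ',' ∉ x := by
      intro x hx
      rcases List.mem_map.mp hx with ⟨o', _, rfl⟩
      cases o' with
      | some n => exact fun h => (pv_toChars_ne n ',' h).2.1 rfl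
      | none => exact (by decide)
    -- A side
    have hA : (('|' :: (pvCell o ++ (rest.map pvCell).flatMap (fun d => ',' :: ' ' :: d)) ++ ['|']).foldl
        pvLoopStep ([], 0)).1 =
        ('|' :: pvCell o) ++ pvTail 1 (rest.map pvCell) ++ ['|'] := by
      have hsplit : '|' :: (pvCell o ++ (rest.map pvCell).flatMap (fun d => ',' :: ' ' :: d)) ++ ['|'] =
          ('|' :: pvCell o) ++ ((rest.map pvCell).flatMap (fun d => ',' :: ' ' :: d) ++ ['|']) := by
        simp
      rw [hsplit, List.foldl_append,
        pv_foldl_no_comma ('|' :: pvCell o) [] 0 (by simp [hnc]), List.foldl_append]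
      have h0 : (0 : Int) = ((0 : Nat) : Int) := rfl
      rw [h0, pv_foldl_tail (rest.map pvCell) 0 _ hrest,
        pv_foldl_no_comma ['|'] _ _ (by decide)]
      simp
    rw [hA]
    -- B side
    have hB : (PySem.List.enumerate (pvCell o :: rest.map pvCell) 0).foldl pvBStep ['|'] =
        ('|' :: pvCell o) ++ pvTail 1 (rest.map pvCell) := by
      simp only [PySem.List.enumerate]
      rw [List.foldl_cons]
      have h1 : pvBStep ['|'] ((0 : Int), pvCell o) = '|' :: pvCell o := by
        simp [pvBStep]
      rw [h1]
      have : ((0 : Int) + 1) = ((1 : Nat) : Int) := by norm_num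
      rw [this, pv_foldl_alt (rest.map pvCell) 1 _ (le_refl 1)]
    rw [hB]

-- ===== VERDICT (by name: the statement is the Claim_ definition above) =====
theorem preprint_spec : Claim_equal_preprint := by
  intro line _
  exact pv_main line
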